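-- pv_equiv track=rewrite | github.com/jbmiller10/semantik | scripts/validate_env.py | _is_weak_secret
-- ===== SOURCE A (Python) =====
-- def _is_weak_secret(value: str, minimum_length: int = 16) -> bool:
--     if len(value) < minimum_length:
--         return True
--     categories = {
--         "upper": any(c.isupper() for c in value),
--         "lower": any(c.islower() for c in value),
--         "digit": any(c.isdigit() for c in value),
--         "symbol": any(not c.isalnum() for c in value),
--     }
--     return sum(categories.values()) < 3
-- ===== SOURCE B (Python) =====
-- def _category(c):
--     # character class of c; in ASCII a char that is neither upper, lower nor digit is not alnum
--     if c.isupper():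
--         return "upper"
--     if c.islower():
--         return "lower"
--     if c.isdigit():
--         return "digit"
--     return "symbol"
--
--
-- def _is_weak_secret(value: str, minimum_length: int = 16) -> bool:
--     if len(value) < minimum_length:
--         return True
--     return len({_category(c) for c in value}) < 3
-- ===== Notes on version B (the rewrite author's own statement) =====
-- stated objective: simpler
-- what changed: B classifies each character into its single character class and counts the distinct classes collected in a set, instead of A's four independent any() presence scans summed as booleans.
import Mathlib
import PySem

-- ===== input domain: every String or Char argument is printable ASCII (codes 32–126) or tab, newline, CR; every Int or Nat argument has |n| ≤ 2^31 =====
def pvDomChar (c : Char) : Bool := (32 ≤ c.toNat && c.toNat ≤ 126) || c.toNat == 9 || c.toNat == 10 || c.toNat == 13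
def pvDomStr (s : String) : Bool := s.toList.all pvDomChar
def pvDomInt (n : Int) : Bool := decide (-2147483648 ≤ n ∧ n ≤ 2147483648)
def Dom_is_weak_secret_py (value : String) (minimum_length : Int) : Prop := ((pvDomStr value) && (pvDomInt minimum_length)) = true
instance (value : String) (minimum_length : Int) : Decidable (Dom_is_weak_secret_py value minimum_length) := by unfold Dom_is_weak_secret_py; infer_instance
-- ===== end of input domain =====

-- B classifies each character into its single character class and counts the distinct classes in a set, instead of A's four summed any() presence scans (alternative decomposition, same cost).


-- ===== PORT A =====
def is_weak_secret_py (value : String) (minimum_length : Int) : Bool :=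
  if (PySem.Str.len value : Int) < minimum_length then true
  else
    let upper := value.toList.any PySem.Chars.isupper
    let lower := value.toList.any PySem.Chars.islower
    let digit := value.toList.any PySem.Chars.isdigit
    let symbol := value.toList.any (fun c => !PySem.Chars.isalnum c)
    decide ((upper.toNat + lower.toNat + digit.toNat + symbol.toNat : Int) < 3)

-- ===== PORT B =====
def pvCategory (c : Char) : String :=
  if PySem.Chars.isupper c then "upper"
  else if PySem.Chars.islower c then "lower"
  else if PySem.Chars.isdigit c then "digit"
  else "symbol"

def is_weak_secret_py_alt (value : String) (minimum_length : Int) : Bool :=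
  if (PySem.Str.len value : Int) < minimum_length then true
  else decide (PySem.Set.len (PySem.Set.ofList (value.toList.map pvCategory)) < 3)

-- ===== PRECONDITION & SPEC =====
def Spec_is_weak_secret_py (value : String) (minimum_length : Int) (out : Bool) : Prop := out = is_weak_secret_py_alt value minimum_length
instance (value : String) (minimum_length : Int) (out : Bool) : Decidable (Spec_is_weak_secret_py value minimum_length out) := by unfold Spec_is_weak_secret_py; infer_instance

-- ===== CLAIM (what is proved, stated in full; the proofs are below) =====
def Claim_equal_is_weak_secret_py : Prop := ∀ (value : String) (minimum_length : Int), Dom_is_weak_secret_py value minimum_length → Spec_is_weak_secret_py value minimum_length (is_weak_secret_py value minimum_length)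

-- ===== LEMMAS AND PROOFS =====

-- a nodup list of labels drawn from the four class names has length = number of present labels
theorem pvLen_label_list (L : List String) (hnd : L.Nodup)
    (hsub : ∀ x ∈ L, x = "upper" ∨ x = "lower" ∨ x = "digit" ∨ x = "symbol") :
    L.length = (decide ("upper" ∈ L)).toNat + (decide ("lower" ∈ L)).toNat
      + (decide ("digit" ∈ L)).toNat + (decide ("symbol" ∈ L)).toNat := by
  induction L with
  | nil => simp
  | cons a t ih =>
    rcases List.nodup_cons.mp hnd with ⟨hna, hndt⟩
    have ht := ih hndt (fun x hx => hsub x (List.mem_cons_of_mem a hx))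
    rcases hsub a (List.mem_cons_self) with h | h | h | h <;> subst h <;>
      simp [List.mem_cons, hna, ht] <;> omega

-- the three alphanumeric classes are pairwise disjoint
theorem pvDisj (c : Char) :
    (PySem.Chars.isupper c = true → PySem.Chars.islower c = false ∧ PySem.Chars.isdigit c = false) ∧
    (PySem.Chars.islower c = true → PySem.Chars.isdigit c = false) := by
  have hA : 'A'.val.toNat = 65 := rfl
  have hZ : 'Z'.val.toNat = 90 := rfl
  have ha : 'a'.val.toNat = 97 := rfl
  have hz : 'z'.val.toNat = 122 := rfl
  have h0 : '0'.val.toNat = 48 := rfl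
  have h9 : '9'.val.toNat = 57 := rfl
  simp only [PySem.Chars.isupper, PySem.Chars.islower, PySem.Chars.isdigit, Bool.and_eq_true,
    decide_eq_true_eq, Char.le_def, Bool.and_eq_false_iff, decide_eq_false_iff_not, not_le,
    UInt32.le_iff_toNat_le]
  omega

theorem pvCat_upper (c : Char) : (pvCategory c = "upper") ↔ PySem.Chars.isupper c = true := by
  unfold pvCategory; split_ifs <;> simp_all

theorem pvCat_lower (c : Char) : (pvCategory c = "lower") ↔ PySem.Chars.islower c = true := by
  unfold pvCategory
  split_ifs with h1 h2 <;> simp_all [((pvDisj c).1 · |>.1)]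

theorem pvCat_digit (c : Char) : (pvCategory c = "digit") ↔ PySem.Chars.isdigit c = true := by
  unfold pvCategory
  split_ifs with h1 h2 h3 <;>
    simp_all [((pvDisj c).1 · |>.2), ((pvDisj c).2 ·)]

theorem pvCat_symbol (c : Char) : (pvCategory c = "symbol") ↔ (!PySem.Chars.isalnum c) = true := by
  unfold pvCategory
  simp only [PySem.Chars.isalnum, PySem.Chars.isalpha]
  split_ifs <;> simp_all

theorem pvSet_len_eq (l : List Char) :
    (PySem.Set.ofList (l.map pvCategory)).length
      = (l.any PySem.Chars.isupper).toNat + (l.any PySem.Chars.islower).toNat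
        + (l.any PySem.Chars.isdigit).toNat + (l.any (fun c => !PySem.Chars.isalnum c)).toNat := by
  have hmem : ∀ s : String, (s ∈ PySem.Set.ofList (l.map pvCategory)) ↔ ∃ c, c ∈ l ∧ pvCategory c = s := by
    intro s; rw [PySem.Set.mem_ofList, List.mem_map]
  have hsub : ∀ x ∈ PySem.Set.ofList (l.map pvCategory),
      x = "upper" ∨ x = "lower" ∨ x = "digit" ∨ x = "symbol" := by
    intro x hx
    rcases (hmem x).mp hx with ⟨c, _, rfl⟩
    unfold pvCategory; split_ifs <;> simp
  rw [pvLen_label_list _ (PySem.Set.nodup_ofList _) hsub]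
  congr 1
  · congr 1
    · congr 1
      · simp [hmem, pvCat_upper, ← List.any_eq_true]
      · simp [hmem, pvCat_lower, ← List.any_eq_true]
    · simp [hmem, pvCat_digit, ← List.any_eq_true]
  · congr 1
    rw [Bool.eq_iff_iff]
    simp [hmem, pvCat_symbol, List.any_eq_true]

-- ===== VERDICT (by name: the statement is the Claim_ definition above) =====
theorem is_weak_secret_py_spec : Claim_equal_is_weak_secret_py := by
  intro value minimum_length _
  unfold Spec_is_weak_secret_py is_weak_secret_py is_weak_secret_py_alt
  split_ifs
  · rfl
  · simp only [PySem.Set.len, pvSet_len_eq value.toList]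
    push_cast
    ring_nf
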